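-- pv_equiv track=rewrite | github.com/Bheinarl/algorithm_course_in_ss_afy | day2_swea_day2_pb4837부분집합의합.py | sum_subset
-- ===== SOURCE A (Python) =====
-- def sum_subset(N,K):
--
--     A = [x for x in range(1,13)]
--
--     counts = 0
--
--     for i in range(1 << 12):
--         sum_ele = 0
--         num_ele = 0
--
--         for j in range(12):
--             if i & (1 << j):
--                 sum_ele += A[j] # 부분집합의 원소의 합
--                 num_ele += 1    # 부분집합의 원소의 갯수
--
--         if sum_ele == K and num_ele ==N:
--             counts += 1 # 부분집합의 원소의 합이 K고 부분집합의 원소의 갯수가 N개라면, 결과값 +1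
--
--     result = counts
--
--     return result
-- ===== SOURCE B (Python) =====
-- def sum_subset(N, K):
--     # Recursive backtracking over elements 1..12: either skip the element or
--     # take it (reducing the needed count and sum), instead of scanning all
--     # 2^12 bitmasks.
--     def count(start, n, k):
--         if n == 0:
--             return 1 if k == 0 else 0
--         if start > 12:
--             return 0
--         return count(start + 1, n, k) + count(start + 1, n - 1, k - start)
--     return count(1, N, K)
-- ===== Notes on version B (the rewrite author's own statement) =====
-- stated objective: faster
-- what changed: Replaced the 2^12-bitmask scan (computing sum and popcount of every mask) by a recursive take/skip backtracking over the elements 1..12 that decrements the needed count and sum.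
import Mathlib
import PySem

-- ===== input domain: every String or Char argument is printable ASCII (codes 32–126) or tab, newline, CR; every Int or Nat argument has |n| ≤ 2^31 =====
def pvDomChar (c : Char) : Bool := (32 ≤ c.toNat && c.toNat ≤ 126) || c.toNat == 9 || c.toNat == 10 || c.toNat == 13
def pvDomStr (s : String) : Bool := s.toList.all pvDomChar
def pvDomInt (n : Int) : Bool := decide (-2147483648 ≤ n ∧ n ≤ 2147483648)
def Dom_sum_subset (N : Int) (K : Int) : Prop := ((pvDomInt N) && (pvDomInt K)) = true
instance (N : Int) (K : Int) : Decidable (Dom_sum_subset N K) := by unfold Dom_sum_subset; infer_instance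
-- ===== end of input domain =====

-- B replaces A's scan of all 2^12 bitmasks by a take/skip recursion over the
-- elements 1..12 (objective: faster by pruning; equal on all inputs).

-- ===== PORT A =====
-- `i & (1 << j)` is ported as `PySem.Int.band i (1 <<< j.toNat)`: Lean's `<<<` on Int
-- is Python's `<<` for the nonnegative shift amounts j ∈ range(12) that occur.
-- `A[j]` is `(PySem.List.pyGet? A j).getD 0`: j ∈ range(12) is always in range for the
-- 12-element A, so pyGet? is `some` and the default is never used (exact here).
def sum_subset (N : Int) (K : Int) : Int :=
  let A : List Int := (PySem.List.pyRange 1 13).map (fun x => x)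
  let counts : Int :=
    (PySem.List.pyRange 0 ((1:Int) <<< 12)).foldl (fun counts i =>
      let sn : Int × Int :=
        (PySem.List.pyRange 0 12).foldl (fun sn j =>
          if PySem.Int.band i ((1:Int) <<< j.toNat) ≠ 0 then
            (sn.1 + (PySem.List.pyGet? A j).getD 0, sn.2 + 1)
          else sn) (0, 0)
      if sn.1 = K ∧ sn.2 = N then counts + 1 else counts) 0
  counts

-- ===== PORT B =====
def countTake (start n k : Int) : Int :=
  if n = 0 then (if k = 0 then 1 else 0)
  else if start > 12 then 0
  else countTake (start + 1) n k + countTake (start + 1) (n - 1) (k - start)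
termination_by (13 - start).toNat
decreasing_by all_goals omega

def sum_subset_alt (N : Int) (K : Int) : Int := countTake 1 N K

-- ===== PRECONDITION & SPEC =====
def Spec_sum_subset (N : Int) (K : Int) (out : Int) : Prop := out = sum_subset_alt N K
instance (N : Int) (K : Int) (out : Int) : Decidable (Spec_sum_subset N K out) := by unfold Spec_sum_subset; infer_instance

-- ===== CLAIM (what is proved, stated in full; the proofs are below) =====
def Claim_equal_sum_subset : Prop := ∀ (N : Int) (K : Int), Dom_sum_subset N K → Spec_sum_subset N K (sum_subset N K)

-- ===== LEMMAS AND PROOFS =====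

/-- Sum of the elements j+1 selected by the low m bits of i. -/
def sval : Nat → Nat → Int
  | 0, _ => 0
  | m+1, i => sval m i + (if i.testBit m then ((m : Int) + 1) else 0)

/-- Number of set bits among the low m bits of i. -/
def pcnt : Nat → Nat → Int
  | 0, _ => 0
  | m+1, i => pcnt m i + (if i.testBit m then 1 else 0)

/-- A-side abstraction: number of masks i < 2^m with sum k and popcount n. -/
def Scnt (m : Nat) (n k : Int) : Int :=
  ((List.range (2^m)).countP (fun i => decide (sval m i = k ∧ pcnt m i = n)) : Int)

/-- Number of sublists of xs with length n and sum k. -/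
def fcnt : List Int → Int → Int → Int
  | [], n, k => if n = 0 ∧ k = 0 then 1 else 0
  | x :: xs, n, k => fcnt xs n k + fcnt xs (n - 1) (k - x)

theorem sval_congr (m : Nat) {a b : Nat} (h : ∀ j, j < m → a.testBit j = b.testBit j) :
    sval m a = sval m b := by
  induction m with
  | zero => rfl
  | succ m ih =>
    simp only [sval, h m (Nat.lt_succ_self m), ih (fun j hj => h j (Nat.lt_succ_of_lt hj))]

theorem pcnt_congr (m : Nat) {a b : Nat} (h : ∀ j, j < m → a.testBit j = b.testBit j) :
    pcnt m a = pcnt m b := by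
  induction m with
  | zero => rfl
  | succ m ih =>
    simp only [pcnt, h m (Nat.lt_succ_self m), ih (fun j hj => h j (Nat.lt_succ_of_lt hj))]

theorem fcnt_neg (xs : List Int) (n k : Int) (h : n < 0) : fcnt xs n k = 0 := by
  induction xs generalizing n k with
  | nil => simp [fcnt]; omega
  | cons x xs ih => simp [fcnt, ih _ _ h, ih (n - 1) _ (by omega)]

theorem fcnt_zero (xs : List Int) (k : Int) : fcnt xs 0 k = if k = 0 then 1 else 0 := by
  induction xs generalizing k with
  | nil => simp [fcnt]
  | cons x xs ih =>
    rw [show fcnt (x :: xs) 0 k = fcnt xs 0 k + fcnt xs (0 - 1) (k - x) from rfl,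
        show (0:Int) - 1 = -1 from by norm_num, fcnt_neg xs (-1) (k - x) (by norm_num), ih]
    simp

theorem fcnt_snoc (xs : List Int) (x n k : Int) :
    fcnt (xs ++ [x]) n k = fcnt xs n k + fcnt xs (n - 1) (k - x) := by
  induction xs generalizing n k with
  | nil => rfl
  | cons y ys ih =>
    simp only [List.cons_append, fcnt, ih]
    have h : k - y - x = k - x - y := by ring
    rw [h]; ring

theorem scnt_zero (n k : Int) : Scnt 0 n k = fcnt [] n k := by
  simp [Scnt, fcnt, sval, pcnt, List.countP, List.countP.go]
  by_cases hk : k = 0 <;> by_cases hn : n = 0 <;> simp [hk, hn, eq_comm]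

theorem scnt_succ (m : Nat) (n k : Int) :
    Scnt (m+1) n k = Scnt m n k + Scnt m (n - 1) (k - ((m : Int) + 1)) := by
  have hsplit : List.range (2^(m+1)) = List.range (2^m) ++ (List.range (2^m)).map (2^m + ·) := by
    rw [pow_succ, mul_two, List.range_add]
  have e1 : (List.range (2^(m+1))).countP (fun i => decide (sval (m+1) i = k ∧ pcnt (m+1) i = n))
      = (List.range (2^m)).countP (fun i => decide (sval (m+1) i = k ∧ pcnt (m+1) i = n))
        + (List.range (2^m)).countP
            (fun i => decide (sval (m+1) (2^m + i) = k ∧ pcnt (m+1) (2^m + i) = n)) := by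
    rw [hsplit, List.countP_append, List.countP_map]; rfl
  have e2 : (List.range (2^m)).countP (fun i => decide (sval (m+1) i = k ∧ pcnt (m+1) i = n))
      = (List.range (2^m)).countP (fun i => decide (sval m i = k ∧ pcnt m i = n)) := by
    refine List.countP_congr ?_
    intro i hi
    rw [List.mem_range] at hi
    simp [sval, pcnt, Nat.testBit_lt_two_pow hi]
  have e3 : (List.range (2^m)).countP
        (fun i => decide (sval (m+1) (2^m + i) = k ∧ pcnt (m+1) (2^m + i) = n))
      = (List.range (2^m)).countP
          (fun i => decide (sval m i = k - ((m : Int) + 1) ∧ pcnt m i = n - 1)) := by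
    refine List.countP_congr ?_
    intro i hi
    rw [List.mem_range] at hi
    have hb : (2^m + i).testBit m = true := by
      rw [Nat.testBit_two_pow_add_eq, Nat.testBit_lt_two_pow hi]; rfl
    have hlo : ∀ j, j < m → (2^m + i).testBit j = i.testBit j := fun j hj =>
      Nat.testBit_two_pow_add_gt hj i
    simp only [sval, pcnt, hb, if_true, sval_congr m hlo, pcnt_congr m hlo,
      decide_eq_true_eq]
    constructor <;> rintro ⟨h1, h2⟩ <;> exact ⟨by omega, by omega⟩
  unfold Scnt
  rw [e1, e2, e3]
  push_cast; ring

theorem scnt_eq_fcnt (m : Nat) (n k : Int) :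
    Scnt m n k = fcnt (PySem.List.pyRange 1 ((m : Int) + 1)) n k := by
  induction m generalizing n k with
  | zero => simpa [PySem.List.pyRange] using scnt_zero n k
  | succ m ih =>
    have hr : PySem.List.pyRange 1 ((m : Int) + 1 + 1) =
        PySem.List.pyRange 1 ((m : Int) + 1) ++ [(m : Int) + 1] :=
      PySem.List.pyRange_one_succ_right (by omega)
    push_cast
    rw [scnt_succ, ih, ih, hr, fcnt_snoc]

theorem countTake_eq_fcnt (fuel : Nat) (start n k : Int) (hf : (13 - start).toNat ≤ fuel) :
    countTake start n k = fcnt (PySem.List.pyRange start 13) n k := by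
  induction fuel generalizing start n k with
  | zero =>
    have hempty : PySem.List.pyRange start 13 = [] := by
      simp [PySem.List.pyRange]; omega
    rw [countTake, hempty]
    have hs : start > 12 := by omega
    simp only [fcnt, hs, if_true]
    by_cases hn : n = 0 <;> by_cases hk : k = 0 <;> simp [hn, hk]
  | succ fuel ih =>
    by_cases hs : start > 12
    · have hempty : PySem.List.pyRange start 13 = [] := by
        simp [PySem.List.pyRange]; omega
      rw [countTake, hempty]
      simp only [fcnt, hs, if_true]
      by_cases hn : n = 0 <;> by_cases hk : k = 0 <;> simp [hn, hk]
    · have hlt : start < 13 := by omega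
      have hrec : (13 - (start + 1)).toNat ≤ fuel := by omega
      rw [PySem.List.pyRange_one_cons hlt, countTake]
      by_cases hn : n = 0
      · subst hn
        rw [show fcnt (start :: PySem.List.pyRange (start + 1) 13) 0 k
              = fcnt (PySem.List.pyRange (start + 1) 13) 0 k
                + fcnt (PySem.List.pyRange (start + 1) 13) (0 - 1) (k - start) from rfl,
            fcnt_zero, fcnt_neg _ _ _ (by norm_num)]
        simp
      · rw [show fcnt (start :: PySem.List.pyRange (start + 1) 13) n k
              = fcnt (PySem.List.pyRange (start + 1) 13) n k
                + fcnt (PySem.List.pyRange (start + 1) 13) (n - 1) (k - start) from rfl,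
            ← ih (start + 1) n k hrec, ← ih (start + 1) (n - 1) (k - start) hrec]
        simp [hn, hs]

/-- The inner j-loop of A computes (sval, pcnt) of the low bits of i. -/
theorem inner_loop_eq (i : Int) (hi : 0 ≤ i) (m : Nat) (hm : m ≤ 12) :
    (PySem.List.pyRange 0 (m : Int)).foldl (fun sn j =>
        if PySem.Int.band i ((1:Int) <<< j.toNat) ≠ 0 then
          (sn.1 + (PySem.List.pyGet? ((PySem.List.pyRange 1 13).map (fun x => x)) j).getD 0,
            sn.2 + 1)
        else sn) ((0 : Int), (0 : Int)) = (sval m i.toNat, pcnt m i.toNat) := by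
  induction m with
  | zero => simp [PySem.List.pyRange, sval, pcnt]
  | succ m ih =>
    have hm' : m ≤ 12 := by omega
    have hr : PySem.List.pyRange 0 ((m : Int) + 1) = PySem.List.pyRange 0 (m : Int) ++ [(m : Int)] :=
      PySem.List.pyRange_one_succ_right (by omega)
    have hband : PySem.Int.band i ((1:Int) <<< ((m : Nat) : Int))
        = ((((i.toNat.testBit m).toNat * 2^m : Nat)) : Int) := by
      rw [Int.one_shiftLeft m, PySem.Int.band_of_nonneg hi (Int.natCast_nonneg _),
        Int.toNat_natCast, Nat.and_two_pow]
    have hget : ((PySem.List.pyGet? ((PySem.List.pyRange 1 13).map (fun x => x)) ((m : Int))).getD 0)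
        = (m : Int) + 1 := by
      have h12 : PySem.List.pyRange 1 13 = [1,2,3,4,5,6,7,8,9,10,11,12] := by decide
      have hlt12 : m < 12 := by omega
      rw [List.map_id', h12]
      interval_cases m <;> decide
    push_cast
    rw [hr, List.foldl_append, ih hm']
    simp only [List.foldl_cons, List.foldl_nil, Int.toNat_natCast, hget]
    cases hb : i.toNat.testBit m with
    | false =>
      rw [if_neg (by rw [hband, hb]; simp)]
      simp [sval, pcnt, hb]
    | true =>
      rw [if_pos (by rw [hband, hb]; simp)]
      simp [sval, pcnt, hb]

theorem sum_subset_eq_scnt (N K : Int) : sum_subset N K = Scnt 12 N K := by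
  unfold sum_subset
  dsimp only
  have h4096 : ((1:Int) <<< 12) = ((4096 : Nat) : Int) := by decide
  rw [h4096, PySem.List.pyRange_zero_natCast, List.foldl_map]
  have hbody : ∀ (c : Int) (iN : Nat), iN ∈ List.range 4096 →
      (fun counts (i : Int) =>
        let sn : Int × Int :=
          (PySem.List.pyRange 0 12).foldl (fun sn j =>
            if PySem.Int.band i ((1:Int) <<< j.toNat) ≠ 0 then
              (sn.1 + (PySem.List.pyGet? ((PySem.List.pyRange 1 13).map (fun x => x)) j).getD 0,
                sn.2 + 1)
            else sn) (0, 0)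
        if sn.1 = K ∧ sn.2 = N then counts + 1 else counts) c (iN : Int)
      = (if decide (sval 12 iN = K ∧ pcnt 12 iN = N) = true then c + 1 else c) := by
    intro c iN _
    have := inner_loop_eq (iN : Int) (by positivity) 12 (by omega)
    dsimp only
    simp only [Nat.cast_ofNat, Int.toNat_natCast] at this
    rw [this]
    simp
  rw [PySem.List.foldl_congr_mem _ _ _ _ hbody]
  rw [PySem.List.foldl_count_if (fun iN => decide (sval 12 iN = K ∧ pcnt 12 iN = N)) (List.range 4096) 0]
  unfold Scnt
  rw [show (2:Nat)^12 = 4096 from by norm_num]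
  exact zero_add _

-- ===== VERDICT (by name: the statement is the Claim_ definition above) =====
theorem sum_subset_spec : Claim_equal_sum_subset := by
  intro N K _
  unfold Spec_sum_subset sum_subset_alt
  rw [sum_subset_eq_scnt, scnt_eq_fcnt 12 N K,
      countTake_eq_fcnt 12 1 N K (by norm_num)]
  norm_num
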